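-- pv_equiv track=rewrite | github.com/GundalaNikhil/DSA | dsa-problems/Hashing/testcases/tc_generator/generate_hashing_014_to_016.py | solve_hsh015
-- ===== SOURCE A (Python) =====
-- MOD1 = 10**9 + 7
--
-- BASE1 = 313
--
-- def solve_hsh015(s: str, L: int) -> int:
--     """Count pairs of substrings with same double hash"""
--     if L > len(s):
--         return 0
--
--     n = len(s)
--     hash_count = {}
--
--     # Generate all substrings of length L and their hashes
--     for i in range(n - L + 1):
--         substring = s[i:i+L]
--
--         # Compute double hash (using two different bases/mods)
--         hash1 = 0
--         for char in substring:
--             hash1 = (hash1 * BASE1 + ord(char)) % MOD1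
--
--         hash2 = 0
--         BASE2 = 317
--         MOD2 = 10**9 + 9
--         for char in substring:
--             hash2 = (hash2 * BASE2 + ord(char)) % MOD2
--
--         double_hash = (hash1, hash2)
--         hash_count[double_hash] = hash_count.get(double_hash, 0) + 1
--
--     # Count pairs: C(n, 2) for each hash with count n
--     pairs = 0
--     for count in hash_count.values():
--         if count > 1:
--             pairs += count * (count - 1) // 2
--
--     return pairs
-- ===== SOURCE B (Python) =====
-- MOD1 = 10**9 + 7
--
-- BASE1 = 313
--
-- MOD2 = 10**9 + 9
--
-- BASE2 = 317
--
--
-- def solve_hsh015(s: str, L: int) -> int: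
--     """Count pairs of substrings with same double hash (rolling hash, O(1) per window)."""
--     n = len(s)
--     if L <= 0 or L > n:
--         return 0
--     codes = [ord(c) for c in s]
--     pw1 = pow(BASE1, L, MOD1)
--     pw2 = pow(BASE2, L, MOD2)
--     h1 = h2 = 0
--     for c in codes[:L]:
--         h1 = (h1 * BASE1 + c) % MOD1
--         h2 = (h2 * BASE2 + c) % MOD2
--     counts = {(h1, h2): 1}
--     for i in range(L, n):
--         h1 = (h1 * BASE1 + codes[i] - codes[i - L] * pw1) % MOD1
--         h2 = (h2 * BASE2 + codes[i] - codes[i - L] * pw2) % MOD2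
--         key = (h1, h2)
--         counts[key] = counts.get(key, 0) + 1
--     return sum(c * (c - 1) // 2 for c in counts.values())
-- ===== Notes on version B (the rewrite author's own statement) =====
-- stated objective: faster
-- what changed: Replaces the per-window O(L) rehashing of each substring with a rolling polynomial hash (precomputed base^L mod M, O(1) update per window) and a single pass over the string.
-- outside the precondition, e.g. on solve_hsh015('ab', 0): A returns 3, B returns 0; on solve_hsh015('abcab', -1): A returns 15, B returns 0
import Mathlib
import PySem

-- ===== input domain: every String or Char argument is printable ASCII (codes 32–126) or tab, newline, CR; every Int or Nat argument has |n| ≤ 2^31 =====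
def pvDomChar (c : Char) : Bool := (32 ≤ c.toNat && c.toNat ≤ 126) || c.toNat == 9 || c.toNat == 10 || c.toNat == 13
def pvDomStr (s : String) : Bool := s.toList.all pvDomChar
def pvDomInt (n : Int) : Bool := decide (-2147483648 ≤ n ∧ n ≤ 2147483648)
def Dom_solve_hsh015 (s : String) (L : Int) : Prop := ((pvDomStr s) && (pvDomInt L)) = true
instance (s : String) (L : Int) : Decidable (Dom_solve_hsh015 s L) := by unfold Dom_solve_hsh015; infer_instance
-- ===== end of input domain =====

-- B replaces A's per-window rehashing of each substring by a rolling polynomial hash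
-- (precomputed base^L mod M, constant-work update per window), a single-pass algorithm.

-- ===== PORT A =====
-- helper: A's inner `for char in substring: hash = (hash*BASE + ord(char)) % MOD` loop
def pvHashLoop (base m : Int) (cs : List Char) : Int :=
  cs.foldl (fun h c => PySem.Int.mod (h * base + (c.toNat : Int)) m) 0

def solve_hsh015 (s : String) (L : Int) : Int :=
  if L > PySem.Str.len s then 0
  else
    let n := PySem.Str.len s
    let hash_count := (PySem.List.pyRange 0 (n - L + 1)).foldl
      (fun (hc : PySem.Dict (Int × Int) Int) i =>
        let substring := PySem.List.slice s.toList (some i) (some (i + L))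
        let hash1 := pvHashLoop 313 1000000007 substring
        let hash2 := pvHashLoop 317 1000000009 substring
        let dh := (hash1, hash2)
        hc.insert dh (hc.getD dh 0 + 1)) PySem.Dict.empty
    hash_count.values.foldl
      (fun pairs count =>
        if count > 1 then pairs + PySem.Int.floordiv (count * (count - 1)) 2 else pairs) 0

-- ===== PORT B =====
def solve_hsh015_alt (s : String) (L : Int) : Int :=
  let n := PySem.Str.len s
  if L ≤ 0 ∨ L > n then 0
  else
    let codes := s.toList.map (fun c => (c.toNat : Int))
    let pw1 := PySem.Int.powMod 313 L.toNat 1000000007   -- pow(BASE1, L, MOD1); L > 0 here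
    let pw2 := PySem.Int.powMod 317 L.toNat 1000000009
    let h0 := (PySem.List.slice codes none (some L)).foldl
      (fun (h : Int × Int) c =>
        (PySem.Int.mod (h.1 * 313 + c) 1000000007,
         PySem.Int.mod (h.2 * 317 + c) 1000000009)) (0, 0)
    let st := (PySem.List.pyRange L n).foldl
      (fun (st : (Int × Int) × PySem.Dict (Int × Int) Int) i =>
        let h1 := PySem.Int.mod (st.1.1 * 313 + PySem.List.pyGetD codes i 0
                    - PySem.List.pyGetD codes (i - L) 0 * pw1) 1000000007
        let h2 := PySem.Int.mod (st.1.2 * 317 + PySem.List.pyGetD codes i 0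
                    - PySem.List.pyGetD codes (i - L) 0 * pw2) 1000000009
        let key := (h1, h2)
        (key, st.2.insert key (st.2.getD key 0 + 1)))
      (h0, PySem.Dict.empty.insert h0 1)
    ((st.2.values).map (fun c => PySem.Int.floordiv (c * (c - 1)) 2)).sum

-- ===== PRECONDITION & SPEC =====
-- Pre_ excludes L ≤ 0 — a non-positive substring length is outside the function's natural
-- domain; there A's window loop runs n−L+1 times over empty or negative-bound slices
-- (Python wrap-around slicing), an artefact of its implementation, while B returns 0.
def Pre_solve_hsh015 (s : String) (L : Int) : Prop := 1 ≤ L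
instance (s : String) (L : Int) : Decidable (Pre_solve_hsh015 s L) := by unfold Pre_solve_hsh015; infer_instance
def pvWitness_solve_hsh015 : String × Int := ("abab", 2)

def Spec_solve_hsh015 (s : String) (L : Int) (out : Int) : Prop := out = solve_hsh015_alt s L
instance (s : String) (L : Int) (out : Int) : Decidable (Spec_solve_hsh015 s L out) := by unfold Spec_solve_hsh015; infer_instance

-- ===== CLAIM (what is proved, stated in full; the proofs are below) =====
def Claim_equal_solve_hsh015 : Prop := ∀ (s : String) (L : Int), Dom_solve_hsh015 s L → Pre_solve_hsh015 s L → Spec_solve_hsh015 s L (solve_hsh015 s L)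

-- ===== LEMMAS AND PROOFS =====

-- unmodded polynomial value of a window
def pvP (b : Int) (w : List Int) : Int := w.foldl (fun a c => a * b + c) 0
-- the j-th length-Ln window of the code list
def pvW (codes : List Int) (Ln j : Nat) : List Int := (codes.drop j).take Ln
-- the double hash A computes for window j
def pvK (codes : List Int) (Ln j : Nat) : Int × Int :=
  (pvP 313 (pvW codes Ln j) % 1000000007, pvP 317 (pvW codes Ln j) % 1000000009)

lemma pvP_from (b : Int) (w : List Int) (a : Int) :
    w.foldl (fun x c => x * b + c) a = a * b ^ w.length + pvP b w := by
  induction w generalizing a with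
  | nil => simp [pvP]
  | cons c w ih =>
    simp only [List.foldl_cons, List.length_cons]
    rw [ih (a * b + c)]
    have h2 : pvP b (c :: w) = c * b ^ w.length + pvP b w := by
      show List.foldl (fun a c => a * b + c) 0 (c :: w) = _
      rw [List.foldl_cons, show (0 : Int) * b + c = c from by ring]
      exact ih c
    rw [h2]
    ring

lemma pvModFold (b m : Int) (hm : 0 < m) (w : List Int) (a : Int) :
    w.foldl (fun h c => PySem.Int.mod (h * b + c) m) (a % m)
      = (w.foldl (fun h c => h * b + c) a) % m := by
  induction w generalizing a with
  | nil => simp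
  | cons c w ih =>
    simp only [List.foldl_cons]
    rw [PySem.Int.mod_eq_emod_of_pos hm]
    have h1 : (a % m * b + c) % m = (a * b + c) % m :=
      Int.ModEq.add_right c (Int.ModEq.mul_right b (Int.emod_emod a m))
    rw [h1, ih (a * b + c)]

-- the modded char-loop of A equals pvP mod m on the code list
lemma pvHashLoop_eq (b m : Int) (hm : 0 < m) (cs : List Char) :
    pvHashLoop b m cs = pvP b (cs.map (fun c => (c.toNat : Int))) % m := by
  have h := pvModFold b m hm (cs.map (fun c => (c.toNat : Int))) 0
  rw [Int.zero_emod, List.foldl_map] at h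
  rw [pvHashLoop]
  refine h.trans ?_
  rw [pvP, List.foldl_map]

-- window j starts with code j followed by the L−1 codes after it
lemma pvW_cons (codes : List Int) (Ln j : Nat) (hL : 0 < Ln) (hj : j < codes.length) :
    pvW codes Ln j = codes.getD j 0 :: (codes.drop (j + 1)).take (Ln - 1) := by
  rw [pvW, List.drop_eq_getElem_cons hj]
  conv_lhs => rw [show Ln = (Ln - 1) + 1 from by omega]
  rw [List.take_succ_cons, List.getD_eq_getElem codes 0 hj]

-- window j+1 is the L−1 codes after position j followed by code j+L
lemma pvW_snoc (codes : List Int) (Ln j : Nat) (hL : 0 < Ln) (hj : j + Ln < codes.length) :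
    pvW codes Ln (j + 1) = (codes.drop (j + 1)).take (Ln - 1) ++ [codes.getD (j + Ln) 0] := by
  rw [pvW, show Ln = (Ln - 1) + 1 by omega, List.take_add_one]
  congr 1
  rw [List.getElem?_drop, show j + 1 + (Ln - 1) = j + ((Ln - 1) + 1) by omega,
    List.getElem?_eq_getElem (by omega),
    List.getD_eq_getElem codes 0 (by omega)]
  rfl

lemma pvP_append_one (b : Int) (w : List Int) (x : Int) :
    pvP b (w ++ [x]) = pvP b w * b + x := by
  simp [pvP, List.foldl_append]

-- the rolling-hash update is exact
lemma pvRoll (b m : Int) (hm : 0 < m) (codes : List Int) (Ln j : Nat)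
    (hL : 0 < Ln) (hj : j + Ln < codes.length) :
    (pvP b (pvW codes Ln j) % m * b + codes.getD (j + Ln) 0
        - codes.getD j 0 * (b ^ Ln % m)) % m
      = pvP b (pvW codes Ln (j + 1)) % m := by
  set t := (codes.drop (j + 1)).take (Ln - 1) with ht
  have htlen : t.length = Ln - 1 := by
    rw [ht, List.length_take, List.length_drop]; omega
  have hhead : pvP b (pvW codes Ln j) = codes.getD j 0 * b ^ (Ln - 1) + pvP b t := by
    rw [pvW_cons codes Ln j hL (by omega), ← ht]
    show List.foldl (fun a c => a * b + c) 0 (codes.getD j 0 :: t) = _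
    rw [List.foldl_cons,
      show (0 : Int) * b + codes.getD j 0 = codes.getD j 0 from by ring, ← htlen]
    exact pvP_from b t (codes.getD j 0)
  have hpow : b ^ (Ln - 1) * b = b ^ Ln := by
    rw [← pow_succ]; congr 1; omega
  have hnew : pvP b (pvW codes Ln (j + 1))
      = pvP b (pvW codes Ln j) * b + codes.getD (j + Ln) 0 - codes.getD j 0 * b ^ Ln := by
    rw [pvW_snoc codes Ln j hL hj, pvP_append_one, hhead]
    linear_combination (- codes.getD j 0) * hpow
  rw [hnew]
  exact Int.ModEq.sub
    (Int.ModEq.add_right _ (Int.ModEq.mul_right b (Int.emod_emod _ m)))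
    (Int.ModEq.mul_left _ (Int.emod_emod _ m))

-- counting step used by both dicts
def pvCount (d : PySem.Dict (Int × Int) Int) (k : Int × Int) : PySem.Dict (Int × Int) Int :=
  d.insert k (d.getD k 0 + 1)

-- every value of a counter is at least 1
lemma pvCounterValues_pos (keys : List (Int × Int)) (c : Int)
    (hc : c ∈ (PySem.Dict.counter keys).values) : 1 ≤ c := by
  have hv : (PySem.Dict.counter keys).values
      = ((PySem.Set.ofList keys).map (fun k => (k, (keys.count k : Int)))).map Prod.snd := by
    rw [PySem.Dict.values, PySem.Dict.items_counter]
  rw [hv, List.map_map] at hc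
  obtain ⟨k, hk, hck⟩ := List.mem_map.mp hc
  have hmem : k ∈ keys := (PySem.Set.mem_ofList keys k).mp hk
  have hcnt : 1 ≤ keys.count k := List.one_le_count_iff.mpr hmem
  simp only [Function.comp] at hck
  omega

-- A's pairs loop over positive counts is the plain sum of C(c,2)
lemma pvPairsFold (vs : List Int) (h : ∀ c ∈ vs, 1 ≤ c) :
    vs.foldl (fun pairs count =>
        if count > 1 then pairs + PySem.Int.floordiv (count * (count - 1)) 2 else pairs) 0
      = (vs.map (fun c => PySem.Int.floordiv (c * (c - 1)) 2)).sum := by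
  have hcong : vs.foldl (fun pairs count =>
        if count > 1 then pairs + PySem.Int.floordiv (count * (count - 1)) 2 else pairs) 0
      = vs.foldl (fun pairs count =>
        pairs + PySem.Int.floordiv (count * (count - 1)) 2) 0 := by
    apply PySem.List.foldl_congr_mem
    intro acc x hx
    by_cases h1 : x > 1
    · simp [h1]
    · have hx1 : x = 1 := by have := h x hx; omega
      subst hx1
      simp
  rw [hcong, PySem.List.foldl_add]
  simp

-- A's dict is the counter of the direct window hashes
lemma pvDictA (s : String) (L : Int) (hL : 1 ≤ L) (hn : L ≤ (s.toList.length : Int)) :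
    (PySem.List.pyRange 0 ((s.toList.length : Int) - L + 1)).foldl
      (fun (hc : PySem.Dict (Int × Int) Int) i =>
        hc.insert
          (pvHashLoop 313 1000000007 (PySem.List.slice s.toList (some i) (some (i + L))),
           pvHashLoop 317 1000000009 (PySem.List.slice s.toList (some i) (some (i + L))))
          (hc.getD
            (pvHashLoop 313 1000000007 (PySem.List.slice s.toList (some i) (some (i + L))),
             pvHashLoop 317 1000000009 (PySem.List.slice s.toList (some i) (some (i + L)))) 0 + 1))
      PySem.Dict.empty
    = PySem.Dict.counter ((List.range (s.toList.length - L.toNat + 1)).map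
        (pvK (s.toList.map (fun c => (c.toNat : Int))) L.toNat)) := by
  set codes := s.toList.map (fun c => (c.toNat : Int)) with hcodes
  set Ln := L.toNat with hLn
  have hcast : ((s.toList.length : Int) - L + 1) = ((s.toList.length - Ln + 1 : Nat) : Int) := by
    omega
  rw [hcast, PySem.List.pyRange_zero_natCast, List.foldl_map]
  rw [← PySem.Dict.foldl_insert_getD_add_one_eq_counter, List.foldl_map]
  apply PySem.List.foldl_congr_mem
  intro acc k _
  have hkey : ((pvHashLoop 313 1000000007 (PySem.List.slice s.toList (some (k : Int)) (some ((k : Int) + L)))),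
      (pvHashLoop 317 1000000009 (PySem.List.slice s.toList (some (k : Int)) (some ((k : Int) + L)))))
      = pvK codes Ln k := by
    have hslice : PySem.List.slice s.toList (some (k : Int)) (some ((k : Int) + L))
        = (s.toList.drop k).take Ln := by
      have h : (k : Int) + L = ((k : Nat) : Int) + ((Ln : Nat) : Int) := by omega
      rw [h, PySem.List.slice_natCast_add]
    have hmap : ((s.toList.drop k).take Ln).map (fun c => (c.toNat : Int)) = pvW codes Ln k := by
      rw [pvW, hcodes, List.map_take, List.map_drop]
    rw [hslice, pvK,
      pvHashLoop_eq 313 1000000007 (by norm_num), pvHashLoop_eq 317 1000000009 (by norm_num),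
      hmap]
  simp only at hkey ⊢
  rw [hkey]

-- B's zeta-reduced loop body (defeq to the port's lambda)
def pvStepB (codes : List Int) (Ln : Nat)
    (st : (Int × Int) × PySem.Dict (Int × Int) Int) (i : Int) :
    (Int × Int) × PySem.Dict (Int × Int) Int :=
  ((PySem.Int.mod (st.1.1 * 313 + PySem.List.pyGetD codes i 0
      - PySem.List.pyGetD codes (i - (Ln : Int)) 0 * PySem.Int.powMod 313 Ln 1000000007) 1000000007,
    PySem.Int.mod (st.1.2 * 317 + PySem.List.pyGetD codes i 0
      - PySem.List.pyGetD codes (i - (Ln : Int)) 0 * PySem.Int.powMod 317 Ln 1000000009) 1000000009),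
   st.2.insert
     (PySem.Int.mod (st.1.1 * 313 + PySem.List.pyGetD codes i 0
        - PySem.List.pyGetD codes (i - (Ln : Int)) 0 * PySem.Int.powMod 313 Ln 1000000007) 1000000007,
      PySem.Int.mod (st.1.2 * 317 + PySem.List.pyGetD codes i 0
        - PySem.List.pyGetD codes (i - (Ln : Int)) 0 * PySem.Int.powMod 317 Ln 1000000009) 1000000009)
     (st.2.getD
       (PySem.Int.mod (st.1.1 * 313 + PySem.List.pyGetD codes i 0
          - PySem.List.pyGetD codes (i - (Ln : Int)) 0 * PySem.Int.powMod 313 Ln 1000000007) 1000000007,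
        PySem.Int.mod (st.1.2 * 317 + PySem.List.pyGetD codes i 0
          - PySem.List.pyGetD codes (i - (Ln : Int)) 0 * PySem.Int.powMod 317 Ln 1000000009) 1000000009) 0 + 1))

-- B's loop invariant: from the hash of window M, the remaining indices build the
-- counter of the remaining window keys
lemma pvDictB (codes : List Int) (Ln : Nat) (hLn : 0 < Ln) :
    ∀ (k M : Nat), k = codes.length - Ln - M → M ≤ codes.length - Ln →
    ∀ (d : PySem.Dict (Int × Int) Int),
    ((PySem.List.pyRange ((Ln : Int) + (M : Int)) (codes.length : Int)).foldl
      (pvStepB codes Ln) (pvK codes Ln M, d)).2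
    = ((List.range' (M + 1) (codes.length - Ln - M)).map (pvK codes Ln)).foldl pvCount d := by
  intro k
  induction k with
  | zero =>
    intro M hk hM d
    have hnil : PySem.List.pyRange ((Ln : Int) + (M : Int)) (codes.length : Int) = [] :=
      PySem.List.pyRange_one_eq_nil (by omega)
    rw [hnil, ← hk]
    simp
  | succ k ih =>
    intro M hk hM d
    have hlt : (Ln : Int) + (M : Int) < (codes.length : Int) := by omega
    rw [PySem.List.pyRange_one_cons hlt, List.foldl_cons]
    have hidx : PySem.List.pyGetD codes ((Ln : Int) + (M : Int)) 0 = codes.getD (M + Ln) 0 := by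
      have h : (Ln : Int) + (M : Int) = ((M + Ln : Nat) : Int) := by push_cast; ring
      rw [h, PySem.List.pyGetD_natCast]
    have hidx2 : PySem.List.pyGetD codes ((Ln : Int) + (M : Int) - (Ln : Int)) 0
        = codes.getD M 0 := by
      have h : (Ln : Int) + (M : Int) - (Ln : Int) = ((M : Nat) : Int) := by omega
      rw [h, PySem.List.pyGetD_natCast]
    have hj : M + Ln < codes.length := by omega
    have hroll1 : PySem.Int.mod ((pvK codes Ln M).1 * 313
          + PySem.List.pyGetD codes ((Ln : Int) + (M : Int)) 0
          - PySem.List.pyGetD codes ((Ln : Int) + (M : Int) - (Ln : Int)) 0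
            * PySem.Int.powMod 313 Ln 1000000007) 1000000007
        = (pvK codes Ln (M + 1)).1 := by
      rw [hidx, hidx2, PySem.Int.mod_eq_emod_of_pos (by norm_num),
        PySem.Int.powMod_eq_emod 313 Ln (by norm_num)]
      exact pvRoll 313 1000000007 (by norm_num) codes Ln M hLn hj
    have hroll2 : PySem.Int.mod ((pvK codes Ln M).2 * 317
          + PySem.List.pyGetD codes ((Ln : Int) + (M : Int)) 0
          - PySem.List.pyGetD codes ((Ln : Int) + (M : Int) - (Ln : Int)) 0
            * PySem.Int.powMod 317 Ln 1000000009) 1000000009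
        = (pvK codes Ln (M + 1)).2 := by
      rw [hidx, hidx2, PySem.Int.mod_eq_emod_of_pos (by norm_num),
        PySem.Int.powMod_eq_emod 317 Ln (by norm_num)]
      exact pvRoll 317 1000000009 (by norm_num) codes Ln M hLn hj
    have hstep : pvStepB codes Ln (pvK codes Ln M, d) ((Ln : Int) + (M : Int))
        = (pvK codes Ln (M + 1), pvCount d (pvK codes Ln (M + 1))) := by
      simp only [pvStepB, pvCount]
      rw [hroll1, hroll2]
    rw [hstep]
    have hcast : (Ln : Int) + (M : Int) + 1 = (Ln : Int) + ((M + 1 : Nat) : Int) := by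
      push_cast; ring
    rw [hcast, ih (M + 1) (by omega) (by omega)]
    have hrange : List.range' (M + 1) (codes.length - Ln - M)
        = (M + 1) :: List.range' (M + 2) (codes.length - Ln - (M + 1)) := by
      have h1 : codes.length - Ln - M = (codes.length - Ln - (M + 1)) + 1 := by omega
      rw [h1, List.range'_succ]
    rw [hrange, List.map_cons, List.foldl_cons, pvCount]

-- the initial joint fold of B is the double hash of window 0
lemma pvInitB (codes : List Int) (Ln : Nat) (L : Int) (hL : 0 ≤ L) (hLn : Ln = L.toNat) :
    (PySem.List.slice codes none (some L)).foldl
      (fun (h : Int × Int) c =>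
        (PySem.Int.mod (h.1 * 313 + c) 1000000007,
         PySem.Int.mod (h.2 * 317 + c) 1000000009)) (0, 0)
    = pvK codes Ln 0 := by
  rw [PySem.List.slice_to codes hL, ← hLn]
  rw [PySem.List.foldl_prod_mk
    (fun h c => PySem.Int.mod (h * 313 + c) 1000000007)
    (fun h c => PySem.Int.mod (h * 317 + c) 1000000009)]
  refine Prod.ext ?_ ?_
  · show (codes.take Ln).foldl (fun h c => PySem.Int.mod (h * 313 + c) 1000000007) 0
        = (pvK codes Ln 0).1
    have h0 : (0 : Int) = 0 % (1000000007 : Int) := by norm_num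
    rw [h0, pvModFold 313 1000000007 (by norm_num)]
    simp [pvK, pvW, pvP]
  · show (codes.take Ln).foldl (fun h c => PySem.Int.mod (h * 317 + c) 1000000009) 0
        = (pvK codes Ln 0).2
    have h0 : (0 : Int) = 0 % (1000000009 : Int) := by norm_num
    rw [h0, pvModFold 317 1000000009 (by norm_num)]
    simp [pvK, pvW, pvP]

-- the final sum written over an arbitrary key list
lemma pvSumEq (keys : List (Int × Int)) :
    (PySem.Dict.counter keys).values.foldl
      (fun pairs count =>
        if count > 1 then pairs + PySem.Int.floordiv (count * (count - 1)) 2 else pairs) 0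
    = ((PySem.Dict.counter keys).values.map
        (fun c => PySem.Int.floordiv (c * (c - 1)) 2)).sum :=
  pvPairsFold _ (fun c hc => pvCounterValues_pos keys c hc)

lemma pvMainEq (s : String) (L : Int) (hpre : 1 ≤ L) :
    solve_hsh015 s L = solve_hsh015_alt s L := by
  by_cases hgt : L > (s.toList.length : Int)
  · simp only [solve_hsh015, solve_hsh015_alt, PySem.Str.len_eq]
    rw [if_pos hgt, if_pos (Or.inr hgt)]
  · have hn : L ≤ (s.toList.length : Int) := not_lt.mp hgt
    set codes := s.toList.map (fun c => (c.toNat : Int)) with hcodes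
    set Ln := L.toNat with hLndef
    have hLn : 0 < Ln := by omega
    have hLc : L = (Ln : Int) := by omega
    have hclen : codes.length = s.toList.length := by rw [hcodes, List.length_map]
    have hA : solve_hsh015 s L
        = (PySem.Dict.counter ((List.range (s.toList.length - Ln + 1)).map
            (pvK codes Ln))).values.foldl
            (fun pairs count =>
              if count > 1 then pairs + PySem.Int.floordiv (count * (count - 1)) 2
              else pairs) 0 := by
      simp only [solve_hsh015, PySem.Str.len_eq]
      rw [if_neg hgt]
      exact congrArg
        (fun d : PySem.Dict (Int × Int) Int => d.values.foldl
          (fun pairs count =>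
            if count > 1 then pairs + PySem.Int.floordiv (count * (count - 1)) 2
            else pairs) 0)
        (pvDictA s L hpre hn)
    have hB : solve_hsh015_alt s L
        = ((PySem.Dict.counter ((List.range (s.toList.length - Ln + 1)).map
            (pvK codes Ln))).values.map
            (fun c => PySem.Int.floordiv (c * (c - 1)) 2)).sum := by
      simp only [solve_hsh015_alt, PySem.Str.len_eq]
      rw [if_neg (not_or.mpr ⟨not_le.mpr (by omega), not_lt.mpr hn⟩)]
      have hdict : ((PySem.List.pyRange ((Ln : Int) + ((0 : Nat) : Int)) (codes.length : Int)).foldl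
            (pvStepB codes Ln)
            (pvK codes Ln 0, pvCount PySem.Dict.empty (pvK codes Ln 0))).2
          = PySem.Dict.counter ((List.range (s.toList.length - Ln + 1)).map (pvK codes Ln)) := by
        rw [pvDictB codes Ln hLn (codes.length - Ln - 0) 0 rfl (by omega)
            (pvCount PySem.Dict.empty (pvK codes Ln 0))]
        have hcons : (pvK codes Ln 0) :: (List.range' (0 + 1) (codes.length - Ln - 0)).map (pvK codes Ln)
            = (List.range (s.toList.length - Ln + 1)).map (pvK codes Ln) := by
          rw [← List.map_cons, List.range_eq_range']
          congr 1
          rw [show s.toList.length - Ln + 1 = (codes.length - Ln - 0) + 1 by omega,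
            List.range'_succ]
        calc ((List.range' (0 + 1) (codes.length - Ln - 0)).map (pvK codes Ln)).foldl pvCount
              (pvCount PySem.Dict.empty (pvK codes Ln 0))
            = ((pvK codes Ln 0) :: (List.range' (0 + 1) (codes.length - Ln - 0)).map
                (pvK codes Ln)).foldl pvCount PySem.Dict.empty := by
              rw [List.foldl_cons]
          _ = _ := by
              rw [hcons]
              exact PySem.Dict.foldl_insert_getD_add_one_eq_counter _
      have hinit := pvInitB codes Ln L (by omega) hLndef
      rw [← hcodes, hinit, hLc,
        show ((s.toList.length : Nat) : Int) = ((codes.length : Nat) : Int) by rw [hclen]]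
      have hinsert : PySem.Dict.empty.insert (pvK codes Ln 0) ((1 : Int))
          = pvCount PySem.Dict.empty (pvK codes Ln 0) := by
        simp [pvCount, PySem.Dict.getD_empty]
      rw [hinsert]
      exact congrArg
        (fun d : PySem.Dict (Int × Int) Int =>
          (d.values.map (fun c => PySem.Int.floordiv (c * (c - 1)) 2)).sum)
        hdict
    rw [hA, hB, pvSumEq]

-- ===== VERDICT (by name: the statement is the Claim_ definition above) =====
theorem solve_hsh015_spec : Claim_equal_solve_hsh015 := by
  intro s L _ hpre
  unfold Spec_solve_hsh015
  exact pvMainEq s L hpre
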